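-- pv_equiv track=rewrite | github.com/limoxi/rust | eaglet/utils/string_util.py | hex_to_byte
-- ===== SOURCE A (Python) =====
-- def __is_hex_char(char):
--     assert (char is not None)
--
--     char = char.upper()
--     return (ord(char) >= ord('0') and ord(char) <= ord('9')) or\
--          (ord(char) >= ord('A') and ord(char) <= ord('F'))
--
-- def is_hax_str(hex_str):
--     if hex_str is None or len(hex_str) == 0:
--         return False
--
--     if len(hex_str) % 2 != 0:
--         return False
--
--     for char in hex_str:
--         if not __is_hex_char(char):
--             return False
--
--     return True
--
-- def hex_to_byte(hex_str):
--     """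
--     Convert a string hex byte values into a byte string. The Hex Byte values may
--     or may not be space separated.
--     """
--     # The list comprehension implementation is fractionally slower in this case
--     #
--     #    hex_str = ''.join( hex_str.split(" ") )
--     #    return ''.join( ["%c" % chr( int ( hex_str[i:i+2],16 ) ) \
--     #                                   for i in range(0, len( hex_str ), 2) ] )
--
--     if hex_str is None or len(hex_str) == 0:
--         return hex_str
--
--     if not is_hax_str(hex_str):
--         return hex_str
--
--     bytes = []
--
--     hex_str = ''.join(hex_str.split(" "))
--
--     for i in range(0, len(hex_str), 2):
--         bytes.append(chr(int(hex_str[i:i+2], 16 )))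
--
--     return ''.join(bytes)
-- ===== SOURCE B (Python) =====
-- def _hex_val(c):
--     if '0' <= c <= '9':
--         return ord(c) - 48
--     if 'a' <= c <= 'f':
--         return ord(c) - 87
--     if 'A' <= c <= 'F':
--         return ord(c) - 55
--     return -1
--
-- def hex_to_byte(hex_str):
--     """
--     Convert a string hex byte values into a byte string. Single fused pass:
--     validates and converts each pair, returning the original string unchanged
--     on odd length or the first non-hex character.
--     """
--     if hex_str is None or len(hex_str) == 0:
--         return hex_str
--     if len(hex_str) % 2 != 0:
--         return hex_str
--     out = []
--     for i in range(0, len(hex_str), 2):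
--         h = _hex_val(hex_str[i])
--         l = _hex_val(hex_str[i + 1])
--         if h < 0 or l < 0:
--             return hex_str
--         out.append(chr(h * 16 + l))
--     return ''.join(out)
-- ===== Notes on version B (the rewrite author's own statement) =====
-- stated objective: simpler
-- what changed: Replaces A's separate whole-string validation pass, dead split/join space-stripping and second int()-parsing conversion pass with one fused pass that validates and converts each two-character pair via a digit-value table, short-circuiting to the original string on the first bad character.
import Mathlib
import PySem

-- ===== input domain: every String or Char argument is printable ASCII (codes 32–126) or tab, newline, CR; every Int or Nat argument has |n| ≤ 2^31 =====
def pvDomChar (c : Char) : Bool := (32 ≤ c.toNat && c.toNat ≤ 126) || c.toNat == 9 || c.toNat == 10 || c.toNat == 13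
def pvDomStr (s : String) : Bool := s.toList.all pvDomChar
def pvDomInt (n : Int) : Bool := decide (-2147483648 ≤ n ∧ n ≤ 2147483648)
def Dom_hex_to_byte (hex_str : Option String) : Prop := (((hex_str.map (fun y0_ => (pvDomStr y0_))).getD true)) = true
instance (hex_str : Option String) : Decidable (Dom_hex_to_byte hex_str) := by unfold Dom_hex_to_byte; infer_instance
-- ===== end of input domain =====

-- B replaces A's separate validation pass + dead space-stripping + int()-parsing conversion pass
-- by one fused pass converting each pair via a digit-value table (objective: simpler).

-- ===== PORT A =====

-- __is_hex_char: char = char.upper(); ord comparisons (char.upper() of a 1-char string; the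
-- non-singleton match arm is unreachable since upper maps char-for-char)
def pvIsHexCharA (c : Char) : Bool :=
  match PySem.Chars.upper [c] with
  | [u] => (decide ('0'.toNat ≤ u.toNat) && decide (u.toNat ≤ '9'.toNat)) ||
           (decide ('A'.toNat ≤ u.toNat) && decide (u.toNat ≤ 'F'.toNat))
  | _ => false

def is_hax_str (hex_str : Option String) : Bool :=
  match hex_str with
  | none => false
  | some s =>
    if PySem.Str.len s = 0 then false
    else if PySem.Int.mod (PySem.Str.len s) 2 ≠ 0 then false
    else s.toList.all pvIsHexCharA   -- for-loop returning False on first bad char, else True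

def hex_to_byte (hex_str : Option String) : Option String :=
  match hex_str with
  | none => none
  | some s =>
    if PySem.Str.len s = 0 then some s
    else if !(is_hax_str (some s)) then some s
    else
      -- hex_str = ''.join(hex_str.split(" "))
      let cs := PySem.Chars.join [] (PySem.Chars.splitOn s.toList [' '])
      -- for i in range(0, len(hex_str), 2): bytes.append(chr(int(hex_str[i:i+2], 16)))
      -- int(…, 16) never raises here (is_hax_str guarantees hex digits), so .getD 0 is unreachable
      let bytes := (PySem.List.pyRange 0 (cs.length : Int) 2).foldl
        (fun acc i => acc ++
          [Char.ofNat (((PySem.Int.ofCharsBase? (PySem.List.slice cs (some i) (some (i + 2))) 16).getD 0).toNat)]) []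
      some (String.ofList (PySem.Chars.join [] (bytes.map (fun c => [c]))))

-- ===== PORT B =====

def pvHexVal (c : Char) : Int :=
  if '0' ≤ c ∧ c ≤ '9' then (c.toNat : Int) - 48
  else if 'a' ≤ c ∧ c ≤ 'f' then (c.toNat : Int) - 87
  else if 'A' ≤ c ∧ c ≤ 'F' then (c.toNat : Int) - 55
  else -1

-- the fused loop of Source B: two chars per step; none = early `return hex_str`
def pvConvPairs : List Char → Option (List Char)
  | [] => some []
  | [_] => none
  | hi :: lo :: rest =>
    let h := pvHexVal hi
    let l := pvHexVal lo
    if h < 0 ∨ l < 0 then none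
    else (pvConvPairs rest).map (fun t => Char.ofNat (h * 16 + l).toNat :: t)

def hex_to_byte_alt (hex_str : Option String) : Option String :=
  match hex_str with
  | none => none
  | some s =>
    if s.toList.length = 0 then some s
    else if s.toList.length % 2 ≠ 0 then some s
    else
      match pvConvPairs s.toList with
      | none => some s
      | some out => some (String.ofList out)

-- ===== PRECONDITION & SPEC =====
def Spec_hex_to_byte (hex_str : Option String) (out : Option String) : Prop := out = hex_to_byte_alt hex_str
instance (hex_str : Option String) (out : Option String) : Decidable (Spec_hex_to_byte hex_str out) := by unfold Spec_hex_to_byte; infer_instance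

-- ===== CLAIM (what is proved, stated in full; the proofs are below) =====
def Claim_equal_hex_to_byte : Prop := ∀ (hex_str : Option String), Dom_hex_to_byte hex_str → Spec_hex_to_byte hex_str (hex_to_byte hex_str)

-- ===== LEMMAS AND PROOFS =====

-- on domain chars, A's hex-char test agrees with B's digit value being defined
set_option maxRecDepth 2048 in
theorem pv_charHex_iff (c : Char) (h : pvDomChar c = true) :
    (pvIsHexCharA c = true ↔ 0 ≤ pvHexVal c) := by
  have hb : ∀ n ∈ List.range 128,
      (pvDomChar (Char.ofNat n) = true →
        (pvIsHexCharA (Char.ofNat n) = true ↔ 0 ≤ pvHexVal (Char.ofNat n))) := by decide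
  have hlt : c.toNat < 128 := by
    simp [pvDomChar] at h
    omega
  have := hb c.toNat (List.mem_range.mpr hlt)
  rw [Char.ofNat_toNat] at this
  exact this h

def pvHexChars : List Char :=
  ['0','1','2','3','4','5','6','7','8','9','a','b','c','d','e','f','A','B','C','D','E','F']

set_option maxRecDepth 2048 in
theorem pv_mem_hexChars (c : Char) (h : pvDomChar c = true) (hv : 0 ≤ pvHexVal c) :
    c ∈ pvHexChars := by
  have hb : ∀ n ∈ List.range 128,
      (0 ≤ pvHexVal (Char.ofNat n) → Char.ofNat n ∈ pvHexChars) := by decide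
  have hlt : c.toNat < 128 := by
    simp [pvDomChar] at h
    omega
  have := hb c.toNat (List.mem_range.mpr hlt)
  rw [Char.ofNat_toNat] at this
  exact this hv

-- int([a,b], 16) for two hex digits
theorem pv_pairVal (a b : Char) (ha : a ∈ pvHexChars) (hb : b ∈ pvHexChars) :
    PySem.Int.ofCharsBase? [a, b] 16 = some (pvHexVal a * 16 + pvHexVal b) := by
  fin_cases ha <;> fin_cases hb <;> decide

-- ''.join(l.split(" ")) = l when l has no space
theorem pv_go_no_sep (fuel : Nat) : ∀ (l cur : List Char) (acc : List (List Char)), ' ' ∉ l →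
    PySem.Chars.splitOn.go [' '] fuel l cur acc = acc.reverse ++ [cur.reverse ++ l] := by
  induction fuel with
  | zero => intro l cur acc _; simp [PySem.Chars.splitOn.go]
  | succ n ih =>
    intro l cur acc hl
    cases l with
    | nil => simp [PySem.Chars.splitOn.go]
    | cons c rest =>
      have hc : c ≠ ' ' := fun h => hl (by simp [h])
      have hrest : ' ' ∉ rest := fun h => hl (List.mem_cons_of_mem _ h)
      rw [PySem.Chars.splitOn.go]
      rw [if_neg (by simp [List.isPrefixOf]; exact fun h => absurd h.symm hc)]
      rw [ih rest (c :: cur) acc hrest]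
      simp

theorem pv_splitOn_no_space (l : List Char) (h : ' ' ∉ l) :
    PySem.Chars.join [] (PySem.Chars.splitOn l [' ']) = l := by
  rw [PySem.Chars.splitOn, pv_go_no_sep _ _ _ _ h]
  simp [PySem.Chars.join_singleton]

-- pyRange 0 (2m) 2 = [0, 2, …, 2(m-1)]
theorem pv_pyRange_two (m : Nat) :
    PySem.List.pyRange 0 (2 * m : Nat) 2 = (List.range m).map (fun (k : Nat) => 2 * (k : Int)) := by
  rw [PySem.List.pyRange_of_pos _ _ (by omega)]
  rcases Nat.eq_zero_or_pos m with h | h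
  · subst h; simp
  · have hlt : (0 : Int) < (2 * m : Nat) := by positivity
    rw [if_pos hlt]
    have : ((2 * m : Nat) - 0 + 2 - 1 : Int) = ((2 * m + 1 : Nat) : Int) := by push_cast; ring
    rw [this]
    have h4 : (2 * m + 1) / 2 = m := by omega
    have h3 : ((2 * m + 1 : Nat) : Int) / 2 = (m : Int) := by
      rw [show ((2 * m + 1 : Nat) : Int) / 2 = (((2 * m + 1) / 2 : Nat) : Int) from (Int.natCast_div _ _).symm, h4]
    rw [h3, Int.toNat_natCast]
    apply List.map_congr_left
    intro k _
    ring

-- the fused pass equals A's per-pair int() map, all chars hex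
theorem pv_bytes_eq (m : Nat) : ∀ cs : List Char, cs.length = 2 * m →
    (∀ c ∈ cs, pvDomChar c = true ∧ 0 ≤ pvHexVal c) →
    pvConvPairs cs = some ((List.range m).map
      (fun k => Char.ofNat (((PySem.Int.ofCharsBase? ((cs.drop (2 * k)).take 2) 16).getD 0).toNat))) := by
  induction m with
  | zero =>
    intro cs hlen _
    have : cs = [] := List.eq_nil_of_length_eq_zero (by omega)
    subst this; simp [pvConvPairs]
  | succ n ih =>
    intro cs hlen hhex
    match cs, hlen with
    | a :: b :: rest, hlen =>
      have hrest : rest.length = 2 * n := by simp at hlen; omega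
      have ha := hhex a (by simp)
      have hb := hhex b (by simp)
      have hhex' : ∀ c ∈ rest, pvDomChar c = true ∧ 0 ≤ pvHexVal c :=
        fun c hc => hhex c (by simp [hc])
      rw [pvConvPairs, if_neg (by push_neg; exact ⟨ha.2, hb.2⟩)]
      rw [ih rest hrest hhex']
      have hpair : PySem.Int.ofCharsBase? [a, b] 16 = some (pvHexVal a * 16 + pvHexVal b) :=
        pv_pairVal a b (pv_mem_hexChars a ha.1 ha.2) (pv_mem_hexChars b hb.1 hb.2)
      simp only [List.range_succ_eq_map, List.map_cons, List.map_map, Option.map_some]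
      have hhead : (List.take 2 (List.drop (2 * 0) (a :: b :: rest))) = [a, b] := by simp
      have htail : List.map (fun k => Char.ofNat (((PySem.Int.ofCharsBase?
            ((rest.drop (2 * k)).take 2) 16).getD 0).toNat)) (List.range n)
          = List.map ((fun k => Char.ofNat (((PySem.Int.ofCharsBase?
            (((a :: b :: rest).drop (2 * k)).take 2) 16).getD 0).toNat)) ∘ Nat.succ) (List.range n) := by
        apply List.map_congr_left
        intro k _
        have h2 : 2 * Nat.succ k = 2 * k + 1 + 1 := by omega
        rw [Function.comp_apply, h2, List.drop_succ_cons, List.drop_succ_cons]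
      rw [hhead, hpair, htail]
      simp

-- a bad char anywhere makes B's fused pass bail out
theorem pv_conv_bad : ∀ cs : List Char, cs.length % 2 = 0 →
    (∀ c ∈ cs, pvDomChar c = true) → ¬ (∀ c ∈ cs, pvIsHexCharA c = true) →
    pvConvPairs cs = none := by
  intro cs
  induction cs using pvConvPairs.induct with
  | case1 => intro _ _ hbad; exact absurd (by simp) hbad
  | case2 x => intro h _ _; simp at h
  | case3 hi lo rest h l hif =>
    intro _ hdom hbad
    simp only [pvConvPairs]
    exact if_pos hif
  | case4 hi lo rest h l hif ih =>
    intro hlen hdom hbad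
    have hhi : 0 ≤ pvHexVal hi := by
      have := hif; push_neg at this; exact this.1
    have hlo : 0 ≤ pvHexVal lo := by
      have := hif; push_neg at this; exact this.2
    have hbad' : ¬ (∀ c ∈ rest, pvIsHexCharA c = true) := by
      intro hr
      apply hbad
      intro c hc
      rcases List.mem_cons.mp hc with rfl | hc
      · exact (pv_charHex_iff c (hdom c (by simp))).2 hhi
      rcases List.mem_cons.mp hc with rfl | hc
      · exact (pv_charHex_iff c (hdom c (by simp))).2 hlo
      · exact hr c hc
    have hrec := ih (by simp at hlen ⊢; omega) (fun c hc => hdom c (by simp [hc])) hbad'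
    simp only [pvConvPairs]
    rw [if_neg hif, hrec]
    rfl

-- ===== VERDICT (by name: the statement is the Claim_ definition above) =====
theorem hex_to_byte_spec : Claim_equal_hex_to_byte := by
  intro hex_str hDom
  unfold Spec_hex_to_byte
  cases hex_str with
  | none => rfl
  | some s =>
    have hDomc : ∀ c ∈ s.toList, pvDomChar c = true := by
      have h1 : pvDomStr s = true := by simpa [Dom_hex_to_byte] using hDom
      simpa [pvDomStr, List.all_eq_true] using h1
    by_cases h0 : s.toList.length = 0
    · simp [hex_to_byte, hex_to_byte_alt, PySem.Str.len_eq, h0]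
    · have hlen0 : ¬ (PySem.Str.len s = 0) := by
        rw [PySem.Str.len_eq]; exact_mod_cast h0
      have hmod : PySem.Int.mod (PySem.Str.len s) 2 = (s.toList.length : Int) % 2 := by
        rw [PySem.Str.len_eq]; exact PySem.Int.mod_eq_emod_of_pos (by omega)
      by_cases h2 : s.toList.length % 2 = 0
      · have hmod0 : ¬ ((s.toList.length : Int) % 2 ≠ 0) := by omega
        by_cases hall : ∀ c ∈ s.toList, pvIsHexCharA c = true
        · -- valid hex string: both convert, pair by pair
          obtain ⟨m, hm⟩ : ∃ m, s.toList.length = 2 * m := ⟨s.toList.length / 2, by omega⟩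
          have hsp : ' ' ∉ s.toList := by
            intro hsp
            have := hall _ hsp
            revert this; decide
          have hx : is_hax_str (some s) = true := by
            simp only [is_hax_str, hmod]
            rw [if_neg hlen0, if_neg hmod0]
            exact List.all_eq_true.mpr hall
          have hjoin : PySem.Chars.join [] (PySem.Chars.splitOn s.toList [' ']) = s.toList :=
            pv_splitOn_no_space _ hsp
          have hhex2 : ∀ c ∈ s.toList, pvDomChar c = true ∧ 0 ≤ pvHexVal c :=
            fun c hc => ⟨hDomc c hc, (pv_charHex_iff c (hDomc c hc)).1 (hall c hc)⟩
          have hbytes := pv_bytes_eq m s.toList hm hhex2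
          have hA : hex_to_byte (some s) = some (String.ofList
              ((List.range m).map (fun k => Char.ofNat (((PySem.Int.ofCharsBase?
                ((s.toList.drop (2 * k)).take 2) 16).getD 0).toNat)))) := by
            simp only [hex_to_byte, hx, Bool.not_true, hjoin]
            rw [if_neg hlen0, if_neg (by simp)]
            rw [PySem.List.foldl_append_singleton_eq_map, List.nil_append,
                PySem.Chars.join_nil_singletons]
            rw [hm, pv_pyRange_two, List.map_map]
            congr 2
            apply List.map_congr_left
            intro k _
            have ha : ((2 * (k : Int))).toNat = 2 * k := by omega
            have hb : ((2 * (k : Int) + 2)).toNat - 2 * k = 2 := by omega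
            rw [Function.comp_apply,
                PySem.List.slice_toNat _ (by positivity) (by positivity), ha, hb]
          have hB : hex_to_byte_alt (some s) = some (String.ofList
              ((List.range m).map (fun k => Char.ofNat (((PySem.Int.ofCharsBase?
                ((s.toList.drop (2 * k)).take 2) 16).getD 0).toNat)))) := by
            simp only [hex_to_byte_alt]
            rw [if_neg h0, if_neg (by simpa using h2), hbytes]
          rw [hA, hB]
        · -- invalid char: both return the original
          have hx : is_hax_str (some s) = false := by
            simp only [is_hax_str, hmod]
            rw [if_neg hlen0, if_neg hmod0]
            exact Bool.eq_false_iff.mpr (fun hcon => hall (List.all_eq_true.mp hcon))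
          have hc : pvConvPairs s.toList = none := pv_conv_bad _ h2 hDomc hall
          have hA : hex_to_byte (some s) = some s := by
            simp only [hex_to_byte, hx, Bool.not_false]
            rw [if_neg hlen0, if_pos trivial]
          have hB : hex_to_byte_alt (some s) = some s := by
            simp only [hex_to_byte_alt]
            rw [if_neg h0, if_neg (by simpa using h2), hc]
          rw [hA, hB]
      · -- odd length: both return the original
        have hmodne : (s.toList.length : Int) % 2 ≠ 0 := by omega
        have hx : is_hax_str (some s) = false := by
          simp only [is_hax_str, hmod]
          rw [if_neg hlen0, if_pos hmodne]
        have hA : hex_to_byte (some s) = some s := by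
          simp only [hex_to_byte, hx, Bool.not_false]
          rw [if_neg hlen0, if_pos trivial]
        have hB : hex_to_byte_alt (some s) = some s := by
          simp only [hex_to_byte_alt]
          rw [if_neg h0, if_pos h2]
        rw [hA, hB]
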